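-- pv_equiv track=rewrite | github.com/RangelGasharov/Python_Basics | algorithms/edabit_cinemas.py | maximum_seating
-- ===== SOURCE A (Python) =====
-- def maximum_seating(seats_list):
--     indexes_occupied_seats = []
--     total_possible_seats = 0
--     for i in range(len(seats_list)):
--         if seats_list[i] == 1:
--             indexes_occupied_seats.append(i)
--     if not indexes_occupied_seats:
--         return (len(seats_list) - 1) // 3 + 1
--     total_possible_seats += (indexes_occupied_seats[0]) // 3
--     total_possible_seats += (len(seats_list) - 1 - indexes_occupied_seats[-1]) // 3
--     for i in range(1, len(indexes_occupied_seats)):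
--         gap = indexes_occupied_seats[i] - indexes_occupied_seats[i - 1] - 1
--         if gap >= 5:
--             total_possible_seats += get_amount_of_seats(gap)
--     return total_possible_seats
--
-- def get_amount_of_seats(gap_length):
--     if gap_length < 5:
--         return 0
--     return (gap_length - 2) // 3
-- ===== SOURCE B (Python) =====
-- def maximum_seating(seats_list):
--     total = 0
--     run = 0
--     seen = False
--     for s in seats_list:
--         if s == 1:
--             if not seen:
--                 total += run // 3
--                 seen = True
--             elif run >= 5:
--                 total += (run - 2) // 3
--             run = 0
--         else:
--             run += 1
--     if not seen:
--         return (len(seats_list) - 1) // 3 + 1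
--     return total + run // 3
-- ===== Notes on version B (the rewrite author's own statement) =====
-- stated objective: simpler
-- what changed: Replaces A's two-phase approach (build a list of occupied-seat indices, then handle boundaries and loop over consecutive index pairs) with a single left-to-right pass that tracks the current run of empty seats and a seen-occupied flag, applying the boundary (run//3) and interior ((run-2)//3 when run>=5) formulas inline.
import Mathlib
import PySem

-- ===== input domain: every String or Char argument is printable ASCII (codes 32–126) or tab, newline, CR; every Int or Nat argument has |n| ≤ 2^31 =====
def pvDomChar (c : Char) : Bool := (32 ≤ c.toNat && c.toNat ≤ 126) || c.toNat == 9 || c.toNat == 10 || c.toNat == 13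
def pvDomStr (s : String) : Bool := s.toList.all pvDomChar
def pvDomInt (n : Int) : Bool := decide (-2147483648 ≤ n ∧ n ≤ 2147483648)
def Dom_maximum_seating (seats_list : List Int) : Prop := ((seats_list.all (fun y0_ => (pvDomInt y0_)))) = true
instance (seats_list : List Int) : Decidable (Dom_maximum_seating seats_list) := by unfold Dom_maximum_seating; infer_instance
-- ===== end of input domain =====

-- B replaces A's two passes (index-list build + gap loop) by one left-to-right pass
-- tracking the current empty run; objective: simpler (single pass, no index list).

-- ===== PORT A =====
def get_amount_of_seats (gap_length : Int) : Int :=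
  if gap_length < 5 then 0 else PySem.Int.floordiv (gap_length - 2) 3

def maximum_seating (seats_list : List Int) : Int :=
  let n : Int := (seats_list.length : Int)
  let idx : List Int := (PySem.List.pyRange 0 n 1).foldl
      (fun acc i => if PySem.List.pyGetD seats_list i 0 = 1 then acc ++ [i] else acc) []
  if idx = [] then
    PySem.Int.floordiv (n - 1) 3 + 1
  else
    let t1 := PySem.Int.floordiv (PySem.List.pyGetD idx 0 0) 3
    let t2 := t1 + PySem.Int.floordiv (n - 1 - PySem.List.pyGetD idx (-1) 0) 3
    (PySem.List.pyRange 1 (idx.length : Int) 1).foldl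
      (fun acc i =>
        let gap := PySem.List.pyGetD idx i 0 - PySem.List.pyGetD idx (i - 1) 0 - 1
        if 5 ≤ gap then acc + get_amount_of_seats gap else acc) t2

-- ===== PORT B =====
def maximum_seating_alt (seats_list : List Int) : Int :=
  let st := seats_list.foldl
    (fun (st : Int × Int × Bool) s =>
      let total := st.1; let run := st.2.1; let seen := st.2.2
      if s = 1 then
        if !seen then (total + PySem.Int.floordiv run 3, 0, true)
        else if 5 ≤ run then (total + PySem.Int.floordiv (run - 2) 3, 0, true)
        else (total, 0, true)
      else (total, run + 1, seen))
    ((0 : Int), (0 : Int), false)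
  if !st.2.2 then PySem.Int.floordiv ((seats_list.length : Int) - 1) 3 + 1
  else st.1 + PySem.Int.floordiv st.2.1 3

-- ===== PRECONDITION & SPEC =====
def Spec_maximum_seating (seats_list : List Int) (out : Int) : Prop := out = maximum_seating_alt seats_list
instance (seats_list : List Int) (out : Int) : Decidable (Spec_maximum_seating seats_list out) := by unfold Spec_maximum_seating; infer_instance

-- ===== CLAIM (what is proved, stated in full; the proofs are below) =====
def Claim_equal_maximum_seating : Prop := ∀ (seats_list : List Int), Dom_maximum_seating seats_list → Spec_maximum_seating seats_list (maximum_seating seats_list)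


-- ===== LEMMAS AND PROOFS =====

-- indices (as Ints, offset k) of the occupied seats of a list
def pvOnes (k : Int) : List Int → List Int
  | [] => []
  | x :: xs => (if x = 1 then [k] else []) ++ pvOnes (k + 1) xs

def pvContrib (g : Int) : Int := if 5 ≤ g then PySem.Int.floordiv (g - 2) 3 else 0

def pvGapSum : List Int → Int
  | [] => 0
  | [_] => 0
  | a :: b :: rest => pvContrib (b - a - 1) + pvGapSum (b :: rest)

theorem pvGapSum_short (l : List Int) (h : l.length ≤ 1) : pvGapSum l = 0 := by
  match l with
  | [] => rfl
  | [_] => rfl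
  | _ :: _ :: _ => simp at h

theorem pvOnes_append (x : Int) : ∀ (l : List Int) (k : Int),
    pvOnes k (l ++ [x]) = pvOnes k l ++ (if x = 1 then [k + l.length] else []) := by
  intro l
  induction l with
  | nil => intro k; by_cases hx : x = 1 <;> simp [pvOnes, hx]
  | cons y ys ih =>
    intro k
    simp only [List.cons_append, pvOnes, ih, List.append_assoc]
    by_cases hx : x = 1 <;> simp [hx] <;> push_cast <;> ring_nf

theorem pvGapSum_concat (m : Int) : ∀ (l : List Int), l ≠ [] →
    pvGapSum (l ++ [m]) = pvGapSum l + pvContrib (m - l.getLast?.getD 0 - 1) := by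
  intro l
  induction l with
  | nil => intro h; exact absurd rfl h
  | cons a t ih =>
    intro _
    match t with
    | [] => simp [pvGapSum]
    | b :: rest =>
      have := ih (by simp)
      simp only [List.cons_append, pvGapSum, List.getLast?_cons_cons] at *
      rw [this]; ring

theorem pvHeadD_concat (l : List Int) (m d : Int) (h : l ≠ []) :
    (l ++ [m]).headD d = l.headD d := by
  cases l with
  | nil => exact absurd rfl h
  | cons a t => rfl

theorem pv_get_zero (l : List Int) (h : l ≠ []) :
    PySem.List.pyGetD l 0 0 = l.headD 0 := by
  cases l with
  | nil => exact absurd rfl h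
  | cons a t =>
    rw [PySem.List.pyGetD_eq_getElem _ _ (by omega) (by simp)]
    simp

theorem pv_get_neg_one (l : List Int) (h : l ≠ []) :
    PySem.List.pyGetD l (-1) 0 = l.getLast?.getD 0 := by
  have hn : 1 ≤ l.length := List.length_pos_of_ne_nil h
  simp [PySem.List.pyGetD, PySem.List.pyGet?, PySem.List.pyIdx?, hn, List.getLast?_eq_getElem?]

-- A's first loop builds exactly the occupied-seat index list
theorem pv_idx_fold (l : List Int) : ∀ (fuel : Nat) (a : Int) (acc : List Int),
    0 ≤ a → l.length - a.toNat ≤ fuel →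
    (PySem.List.pyRange a (l.length : Int) 1).foldl
      (fun acc i => if PySem.List.pyGetD l i 0 = 1 then acc ++ [i] else acc) acc
    = acc ++ pvOnes a (l.drop a.toNat) := by
  intro fuel
  induction fuel with
  | zero =>
    intro a acc h0 hf
    have hge : (l.length : Int) ≤ a := by omega
    rw [PySem.List.pyRange_one_eq_nil hge]
    have : l.drop a.toNat = [] := List.drop_eq_nil_of_le (by omega)
    simp [this, pvOnes]
  | succ n ih =>
    intro a acc h0 hf
    by_cases hlt : a < (l.length : Int)
    · rw [PySem.List.pyRange_one_cons hlt]
      have hna : a.toNat < l.length := by omega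
      have hget : PySem.List.pyGetD l a 0 = l[a.toNat] :=
        PySem.List.pyGetD_eq_getElem _ _ h0 (by omega)
      have hdrop : l.drop a.toNat = l[a.toNat] :: l.drop (a.toNat + 1) :=
        List.drop_eq_getElem_cons hna
      have hsucc : (a + 1).toNat = a.toNat + 1 := by omega
      have ih' := fun acc => ih (a + 1) acc (by omega) (by omega)
      rw [List.foldl_cons, hget, ih', hsucc, hdrop]
      by_cases hx : l[a.toNat] = 1 <;> simp only [pvOnes, hx, if_true, if_false, reduceIte] <;>
        simp [List.append_assoc]
    · rw [PySem.List.pyRange_one_eq_nil (by omega)]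
      have : l.drop a.toNat = [] := List.drop_eq_nil_of_le (by omega)
      simp [this, pvOnes]

-- A's second loop adds exactly the interior-gap contributions
theorem pv_gap_fold (idx : List Int) : ∀ (fuel : Nat) (j t : Int),
    1 ≤ j → idx.length - j.toNat ≤ fuel →
    (PySem.List.pyRange j (idx.length : Int) 1).foldl
      (fun acc i =>
        let gap := PySem.List.pyGetD idx i 0 - PySem.List.pyGetD idx (i - 1) 0 - 1
        if 5 ≤ gap then acc + get_amount_of_seats gap else acc) t
    = t + pvGapSum (idx.drop (j.toNat - 1)) := by
  intro fuel
  induction fuel with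
  | zero =>
    intro j t h1 hf
    rw [PySem.List.pyRange_one_eq_nil (by omega)]
    have : (idx.drop (j.toNat - 1)).length ≤ 1 := by
      simp; omega
    simp [pvGapSum_short _ this]
  | succ n ih =>
    intro j t h1 hf
    by_cases hlt : j < (idx.length : Int)
    · rw [PySem.List.pyRange_one_cons hlt]
      have hj1 : j.toNat - 1 < idx.length := by omega
      have hj2 : j.toNat < idx.length := by omega
      have hget1 : PySem.List.pyGetD idx j 0 = idx[j.toNat] :=
        PySem.List.pyGetD_eq_getElem _ _ (by omega) (by omega)
      have hget2 : PySem.List.pyGetD idx (j - 1) 0 = idx[j.toNat - 1] := by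
        rw [PySem.List.pyGetD_eq_getElem _ _ (by omega) (by push_cast; omega)]
        congr 1; omega
      have hd1 : idx.drop (j.toNat - 1) = idx[j.toNat - 1] :: idx.drop (j.toNat - 1 + 1) :=
        List.drop_eq_getElem_cons hj1
      have hd1' : j.toNat - 1 + 1 = j.toNat := by omega
      have hd2 : idx.drop j.toNat = idx[j.toNat] :: idx.drop (j.toNat + 1) :=
        List.drop_eq_getElem_cons hj2
      have hsucc : (j + 1).toNat - 1 = j.toNat := by omega
      have ih' := fun t => ih (j + 1) t (by omega) (by omega)
      rw [List.foldl_cons]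
      simp only []
      rw [ih', hsucc, hd1, hd1', hd2, pvGapSum]
      rw [← hd2]
      have hcon : (if 5 ≤ idx[j.toNat] - idx[j.toNat - 1] - 1 then
            t + get_amount_of_seats (idx[j.toNat] - idx[j.toNat - 1] - 1) else t)
          = t + pvContrib (idx[j.toNat] - idx[j.toNat - 1] - 1) := by
        unfold get_amount_of_seats pvContrib
        split_ifs <;> first | (exfalso; omega) | ring
      rw [hget1, hget2, hcon]
      ring
    · rw [PySem.List.pyRange_one_eq_nil (by omega)]
      have : (idx.drop (j.toNat - 1)).length ≤ 1 := by
        simp; omega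
      simp [pvGapSum_short _ this]

-- the single-pass state after any prefix, in terms of the occupied indices
theorem pv_inv (l : List Int) :
    l.foldl (fun (st : Int × Int × Bool) s =>
      let total := st.1; let run := st.2.1; let seen := st.2.2
      if s = 1 then
        if !seen then (total + PySem.Int.floordiv run 3, 0, true)
        else if 5 ≤ run then (total + PySem.Int.floordiv (run - 2) 3, 0, true)
        else (total, 0, true)
      else (total, run + 1, seen)) ((0 : Int), (0 : Int), false)
    = if pvOnes 0 l = [] then ((0 : Int), (l.length : Int), false)
      else (PySem.Int.floordiv ((pvOnes 0 l).headD 0) 3 + pvGapSum (pvOnes 0 l),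
            (l.length : Int) - 1 - (pvOnes 0 l).getLast?.getD 0, true) := by
  induction l using List.reverseRecOn with
  | nil => simp [pvOnes]
  | append_singleton l x ih =>
    rw [List.foldl_append, ih, pvOnes_append]
    have hlen : (((l ++ [x]).length : Nat) : Int) = (l.length : Int) + 1 := by
      simp
    by_cases hx : x = 1
    · by_cases hO : pvOnes 0 l = []
      · rw [if_pos hO, hO]
        simp only [List.foldl_cons, List.foldl_nil, hx, if_true, reduceIte, Bool.not_false,
          List.nil_append, hlen]
        simp [pvGapSum]
      · rw [if_neg hO]
        simp only [List.foldl_cons, List.foldl_nil, hx, if_true, reduceIte, Bool.not_true,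
          hlen]
        rw [if_neg (show ¬(pvOnes 0 l ++ [0 + (l.length : Int)] = []) by simp),
          pvGapSum_concat _ _ hO, pvHeadD_concat _ _ _ hO]
        simp only [List.getLast?_concat, Option.getD_some, Bool.false_eq_true, if_false]
        have hg : 0 + (l.length : Int) - (pvOnes 0 l).getLast?.getD 0 - 1
            = (l.length : Int) - 1 - (pvOnes 0 l).getLast?.getD 0 := by ring
        rw [hg]
        unfold pvContrib
        split_ifs with h5 <;>
          exact Prod.ext (by ring) (Prod.ext (by push_cast [List.length_append, List.length_cons, List.length_nil]; ring) rfl)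
    · by_cases hO : pvOnes 0 l = []
      · rw [if_pos hO, hO]
        simp only [List.foldl_cons, List.foldl_nil, hx, if_false, reduceIte, List.append_nil,
          hlen]
      · rw [if_neg hO]
        simp only [List.foldl_cons, List.foldl_nil, hx, if_false, reduceIte, List.append_nil,
          hlen]
        rw [if_neg hO]
        exact Prod.ext rfl (Prod.ext (by push_cast [List.length_append, List.length_cons, List.length_nil]; ring) rfl)

theorem pv_A_closed (l : List Int) :
    maximum_seating l
    = if pvOnes 0 l = [] then PySem.Int.floordiv ((l.length : Int) - 1) 3 + 1
      else PySem.Int.floordiv ((pvOnes 0 l).headD 0) 3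
           + PySem.Int.floordiv ((l.length : Int) - 1 - (pvOnes 0 l).getLast?.getD 0) 3
           + pvGapSum (pvOnes 0 l) := by
  have hidx := pv_idx_fold l l.length 0 [] le_rfl (by omega)
  simp only [List.drop_zero, List.nil_append, Int.toNat_zero] at hidx
  simp only [maximum_seating]
  rw [hidx]
  by_cases hO : pvOnes 0 l = []
  · rw [if_pos hO, if_pos hO]
  · rw [if_neg hO, if_neg hO, pv_get_zero _ hO, pv_get_neg_one _ hO]
    have hgap := pv_gap_fold (pvOnes 0 l) (pvOnes 0 l).length 1
      (PySem.Int.floordiv ((pvOnes 0 l).headD 0) 3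
        + PySem.Int.floordiv ((l.length : Int) - 1 - (pvOnes 0 l).getLast?.getD 0) 3)
      le_rfl (by omega)
    simp only [Int.toNat_one, Nat.sub_self, List.drop_zero] at hgap
    rw [hgap]

theorem pv_B_closed (l : List Int) :
    maximum_seating_alt l
    = if pvOnes 0 l = [] then PySem.Int.floordiv ((l.length : Int) - 1) 3 + 1
      else PySem.Int.floordiv ((pvOnes 0 l).headD 0) 3
           + PySem.Int.floordiv ((l.length : Int) - 1 - (pvOnes 0 l).getLast?.getD 0) 3
           + pvGapSum (pvOnes 0 l) := by
  simp only [maximum_seating_alt]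
  rw [pv_inv]
  by_cases hO : pvOnes 0 l = [] <;> simp [hO] <;> ring

-- ===== VERDICT (by name: the statement is the Claim_ definition above) =====
theorem maximum_seating_spec : Claim_equal_maximum_seating := by
  intro l _
  unfold Spec_maximum_seating
  rw [pv_A_closed, pv_B_closed]
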